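-- pv_equiv track=rewrite | github.com/Fiberlux-Tech/FLXContabilidadEEFF | backend/services/pdf/export.py | _remove_orphaned_group_headers
-- ===== SOURCE A (Python) =====
-- def _remove_orphaned_group_headers(rows):
--     """Remove group_header rows that have no normal data rows immediately following them.
--
--     A group_header is orphaned when every row in its group was removed (e.g. by
--     _filter_zero_rows), leaving the header followed directly by another
--     group_header, a total/subtotal, a blank, or the end of the list.
--     """
--     result = []
--     for i, row in enumerate(rows):
--         if row["row_type"] == "group_header":
--             has_data = False
--             for j in range(i + 1, len(rows)):
--                 rt = rows[j]["row_type"]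
--                 if rt == "normal":
--                     has_data = True
--                     break
--                 if rt in ("group_header", "total"):
--                     break
--             if not has_data:
--                 continue
--         result.append(row)
--     return result
-- ===== SOURCE B (Python) =====
-- def _remove_orphaned_group_headers(rows):
--     """Remove group_header rows that have no normal data rows immediately following them."""
--     kept = []
--     next_sig = None
--     for row in reversed(rows):
--         rt = row["row_type"]
--         if rt != "group_header" or next_sig == "normal":
--             kept.append(row)
--         if rt in ("normal", "group_header", "total"):
--             next_sig = rt
--     kept.reverse()
--     return kept
-- ===== Notes on version B (the rewrite author's own statement) =====
-- stated objective: alternative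
-- what changed: Replaces the nested forward scan (for each group_header, an inner loop over the following rows) by a single reverse pass that carries one state variable next_sig = nearest following significant row_type, so the inner scan disappears.
import Mathlib
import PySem

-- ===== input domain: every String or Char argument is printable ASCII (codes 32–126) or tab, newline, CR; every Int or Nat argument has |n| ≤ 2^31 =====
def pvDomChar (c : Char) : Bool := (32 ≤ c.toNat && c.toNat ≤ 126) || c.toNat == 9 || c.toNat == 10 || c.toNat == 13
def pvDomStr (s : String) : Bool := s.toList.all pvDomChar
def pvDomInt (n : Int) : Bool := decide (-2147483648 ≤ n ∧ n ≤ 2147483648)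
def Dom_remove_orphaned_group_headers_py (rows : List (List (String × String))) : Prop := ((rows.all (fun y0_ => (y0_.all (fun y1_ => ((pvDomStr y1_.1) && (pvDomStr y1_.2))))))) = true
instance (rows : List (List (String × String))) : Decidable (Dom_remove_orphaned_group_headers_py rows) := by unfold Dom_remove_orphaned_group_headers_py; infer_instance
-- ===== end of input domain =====

-- B replaces A's nested forward scan by a single reverse pass carrying the nearest
-- following significant row_type; equivalence of the RETURN values is proved below.

-- row["row_type"]; the KeyError case (no "row_type" key) is excluded by Pre_, so the
-- default "" is never taken on admitted inputs
def pvRT (row : List (String × String)) : String :=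
  ((PySem.Dict.mk row).get? "row_type").getD ""

-- ===== PORT A =====
-- inner loop 'for j in range(i+1, len(rows)): …' with its two breaks; the index j is
-- always in range, so rows[j] is PySem.List.pyGetD (exact here, no IndexError possible)
def pvScanA (rows : List (List (String × String))) : List Int → Bool
  | [] => false
  | j :: js =>
    let rt := pvRT (PySem.List.pyGetD rows j [])
    if rt = "normal" then true
    else if rt = "group_header" ∨ rt = "total" then false
    else pvScanA rows js

def remove_orphaned_group_headers_py (rows : List (List (String × String))) : List (List (String × String)) :=
  (PySem.List.enumerate rows).foldl
    (fun result ir =>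
      if pvRT ir.2 = "group_header" ∧
          ¬ (pvScanA rows (PySem.List.pyRange (ir.1 + 1) (PySem.List.len rows) 1) = true)
      then result
      else result ++ [ir.2])
    []

-- ===== PORT B =====
def remove_orphaned_group_headers_py_alt (rows : List (List (String × String))) : List (List (String × String)) :=
  (rows.reverse.foldl
    (fun st row =>
      let rt := pvRT row
      (if rt ≠ "group_header" ∨ st.2 = some "normal" then st.1 ++ [row] else st.1,
       if rt = "normal" ∨ rt = "group_header" ∨ rt = "total" then some rt else st.2))
    ([], (none : Option String))).1.reverse

-- ===== PRECONDITION & SPEC =====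
-- Pre_: every row carries the "row_type" key; on a row without it Python raises KeyError.
def Pre_remove_orphaned_group_headers_py (rows : List (List (String × String))) : Prop :=
  ∀ row ∈ rows, ((PySem.Dict.mk row).get? "row_type").isSome = true

instance (rows : List (List (String × String))) : Decidable (Pre_remove_orphaned_group_headers_py rows) := by
  unfold Pre_remove_orphaned_group_headers_py; infer_instance

def pvWitness_remove_orphaned_group_headers_py : (List (List (String × String))) :=
  [[("row_type", "group_header")], [("row_type", "normal"), ("amount", "7")], [("row_type", "total")]]

def Spec_remove_orphaned_group_headers_py (rows : List (List (String × String))) (out : List (List (String × String))) : Prop := out = remove_orphaned_group_headers_py_alt rows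
instance (rows : List (List (String × String))) (out : List (List (String × String))) : Decidable (Spec_remove_orphaned_group_headers_py rows out) := by unfold Spec_remove_orphaned_group_headers_py; infer_instance

-- ===== CLAIM (what is proved, stated in full; the proofs are below) =====
def Claim_equal_remove_orphaned_group_headers_py : Prop := ∀ (rows : List (List (String × String))), Dom_remove_orphaned_group_headers_py rows → Pre_remove_orphaned_group_headers_py rows → Spec_remove_orphaned_group_headers_py rows (remove_orphaned_group_headers_py rows)

-- ===== LEMMAS AND PROOFS =====

-- the row_type of the nearest significant row of a suffix (none if there is none)
def pvSig : List (List (String × String)) → Option String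
  | [] => none
  | r :: rest =>
    if pvRT r = "normal" ∨ pvRT r = "group_header" ∨ pvRT r = "total" then some (pvRT r)
    else pvSig rest

-- the common reference function both ports compute
def pvF : List (List (String × String)) → List (List (String × String))
  | [] => []
  | r :: rest =>
    if pvRT r = "group_header" ∧ pvSig rest ≠ some "normal" then pvF rest
    else r :: pvF rest

theorem pvScanA_eq (rows : List (List (String × String))) :
    ∀ (suffix : List (List (String × String))) (k : Nat), rows.drop k = suffix →
      pvScanA rows (PySem.List.pyRange (k : Int) (PySem.List.len rows) 1)
        = decide (pvSig suffix = some "normal") := by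
  intro suffix
  induction suffix with
  | nil =>
    intro k hk
    have hlen : rows.length ≤ k := List.drop_eq_nil_iff.mp hk
    rw [PySem.List.pyRange_one_eq_nil (by simp [PySem.List.len]; exact_mod_cast hlen)]
    simp [pvScanA, pvSig]
  | cons r rest ih =>
    intro k hk
    have hklt : k < rows.length := by
      by_contra h
      rw [List.drop_eq_nil_iff.mpr (by omega)] at hk
      exact (List.cons_ne_nil r rest) hk.symm
    have hget : rows[k]? = some r := by
      have : (rows.drop k)[0]? = some r := by rw [hk]; rfl
      simpa using this
    have hdrop1 : rows.drop (k + 1) = rest := by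
      have : (rows.drop k).drop 1 = rows.drop (k + 1) := by
        rw [List.drop_drop]
      rw [← this, hk]; rfl
    rw [PySem.List.pyRange_one_cons (by simp [PySem.List.len]; exact_mod_cast hklt)]
    have hgd : PySem.List.pyGetD rows (k : Int) [] = r := by
      rw [PySem.List.pyGetD_natCast]
      simp [List.getD, hget]
    show pvScanA rows ((k : Int) :: PySem.List.pyRange ((k : Int) + 1) (PySem.List.len rows) 1) = _
    rw [pvScanA]
    simp only [hgd]
    rcases eq_or_ne (pvRT r) "normal" with h1 | h1
    · simp [pvSig, h1]
    · rcases eq_or_ne (pvRT r) "group_header" with h2 | h2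
      · simp [pvSig, h2]
      · rcases eq_or_ne (pvRT r) "total" with h3 | h3
        · simp [pvSig, h3]
        · have : ((k : Int) + 1) = ((k + 1 : Nat) : Int) := by push_cast; ring
          rw [if_neg h1, if_neg (by tauto), this, ih (k + 1) hdrop1]
          simp [pvSig, h1, h2, h3]

theorem pvA_eq (rows : List (List (String × String))) :
    ∀ (l : List (List (String × String))) (k : Nat)
      (acc : List (List (String × String))), rows.drop k = l →
      (PySem.List.enumerate l (k : Int)).foldl
        (fun result ir =>
          if pvRT ir.2 = "group_header" ∧
              ¬ (pvScanA rows (PySem.List.pyRange (ir.1 + 1) (PySem.List.len rows) 1) = true)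
          then result
          else result ++ [ir.2]) acc = acc ++ pvF l := by
  intro l
  induction l with
  | nil => intro k acc _; simp [PySem.List.enumerate, pvF]
  | cons r rest ih =>
    intro k acc hk
    have hdrop1 : rows.drop (k + 1) = rest := by
      have : (rows.drop k).drop 1 = rows.drop (k + 1) := by rw [List.drop_drop]
      rw [← this, hk]; rfl
    rw [PySem.List.enumerate_cons, List.foldl_cons]
    have hcast : ((k : Int) + 1) = ((k + 1 : Nat) : Int) := by push_cast; ring
    have hscan := pvScanA_eq rows rest (k + 1) hdrop1
    rw [show ∀ acc', (PySem.List.enumerate rest ((k : Int) + 1)).foldl _ acc' = acc' ++ pvF rest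
          from fun acc' => by rw [hcast]; exact ih (k + 1) acc' hdrop1]
    simp only [hcast, hscan]
    by_cases h : pvRT r = "group_header" ∧ pvSig rest ≠ some "normal"
    · rw [if_pos (by simpa using h), pvF, if_pos h]
    · rw [if_neg (by simpa using h), pvF, if_neg h, List.append_assoc]
      rfl

theorem pvB_eq (l : List (List (String × String))) :
    l.reverse.foldl
      (fun st row =>
        let rt := pvRT row
        (if rt ≠ "group_header" ∨ st.2 = some "normal" then st.1 ++ [row] else st.1,
         if rt = "normal" ∨ rt = "group_header" ∨ rt = "total" then some rt else st.2))
      ([], (none : Option String)) = ((pvF l).reverse, pvSig l) := by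
  induction l with
  | nil => simp [pvF, pvSig]
  | cons r rest ih =>
    rw [List.reverse_cons, List.foldl_append, ih, List.foldl_cons, List.foldl_nil]
    simp only [Prod.mk.injEq]
    refine ⟨?_, by rw [pvSig]⟩
    by_cases h : pvRT r = "group_header" ∧ pvSig rest ≠ some "normal"
    · rw [if_neg (by tauto), pvF, if_pos h]
    · rw [if_pos (by tauto), pvF, if_neg h, List.reverse_cons]

-- ===== VERDICT (by name: the statement is the Claim_ definition above) =====
theorem remove_orphaned_group_headers_py_spec : Claim_equal_remove_orphaned_group_headers_py := by
  intro rows _ _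
  unfold Spec_remove_orphaned_group_headers_py
  unfold remove_orphaned_group_headers_py remove_orphaned_group_headers_py_alt
  rw [pvB_eq rows]
  have hA := pvA_eq rows rows 0 [] (by simp)
  simp only [Nat.cast_zero] at hA
  rw [hA]
  simp
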